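-- pv_equiv track=rewrite | github.com/Bargwan/JoeNet | reward.py | _backtrack_fill
-- ===== SOURCE A (Python) =====
-- def _backtrack_fill(remaining_obj, sets, runs):
--     """Greedily assigns the largest partials to the largest objective slots."""
--     if not remaining_obj:
--         return 0
--
--     # For distance-to-win, we can simplify:
--     # Sort objective largest first. Fill with largest matching partials.
--     obj = sorted(remaining_obj, reverse=True)
--     total_fill = 0
--
--     # This is a simplified greedy approach for the potential function.
--     # It counts how many cards contribute to required 3s or 4s.
--     used_sets = sorted(sets, reverse=True)
--     used_runs = sorted(runs, reverse=True)
--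
--     for slot_size in obj:
--         if slot_size == 3 and used_sets:
--             found = used_sets.pop(0)
--             total_fill += min(3, found)
--         elif slot_size == 4 and used_runs:
--             found = used_runs.pop(0)
--             total_fill += min(4, found)
--         elif slot_size == 4 and used_sets:
--             # A set can't fill a run slot
--             continue
--         elif slot_size == 3 and used_runs:
--             # A run can't fill a set slot
--             continue
--
--     return total_fill
-- ===== SOURCE B (Python) =====
-- def _backtrack_fill(remaining_obj, sets, runs):
--     """Greedily assigns the largest partials to the largest objective slots."""
--     if not remaining_obj:
--         return 0
--     n3 = remaining_obj.count(3)
--     n4 = remaining_obj.count(4)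
--     set_fill = sum(min(3, s) for s in sorted(sets, reverse=True)[:n3])
--     run_fill = sum(min(4, r) for r in sorted(runs, reverse=True)[:n4])
--     return set_fill + run_fill
-- ===== Notes on version B (the rewrite author's own statement) =====
-- stated objective: simpler
-- what changed: Replaced the interleaved slot-by-slot popping loop over the sorted objective with two category counts (of 3-slots and 4-slots) followed by two independent top-k summations over the sorted sets and runs.
import Mathlib
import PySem

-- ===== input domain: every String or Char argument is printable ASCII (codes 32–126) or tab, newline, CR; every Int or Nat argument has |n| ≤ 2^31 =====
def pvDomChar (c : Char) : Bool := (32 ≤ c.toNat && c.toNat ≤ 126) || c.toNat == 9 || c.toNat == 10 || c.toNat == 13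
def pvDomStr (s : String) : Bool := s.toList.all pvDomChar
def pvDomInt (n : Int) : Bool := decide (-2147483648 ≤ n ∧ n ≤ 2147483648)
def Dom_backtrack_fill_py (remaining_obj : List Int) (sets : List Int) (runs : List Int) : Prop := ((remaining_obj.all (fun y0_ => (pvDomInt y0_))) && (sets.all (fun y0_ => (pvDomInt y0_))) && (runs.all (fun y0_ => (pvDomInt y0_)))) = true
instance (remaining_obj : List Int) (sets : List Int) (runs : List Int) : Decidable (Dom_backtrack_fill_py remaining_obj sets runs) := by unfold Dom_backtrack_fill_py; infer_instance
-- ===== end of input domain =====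

-- B replaces A's interleaved slot-by-slot popping loop with two category counts and two
-- independent top-k summations (objective: simpler); return values proved equal on all inputs.

-- ===== PORT A =====
-- one iteration of A's `for slot_size in obj` loop; state = (used_sets, used_runs, total_fill)
def pvStepA (st : List Int × List Int × Int) (slot : Int) : List Int × List Int × Int :=
  if slot = 3 then
    match st.1 with
    | s :: ss => (ss, st.2.1, st.2.2 + min 3 s)   -- found = used_sets.pop(0); total += min(3, found)
    | [] => st                                     -- slot==3 but no sets: the `elif … used_runs` arm is `continue`
  else if slot = 4 then
    match st.2.1 with
    | r :: rs => (st.1, rs, st.2.2 + min 4 r)      -- found = used_runs.pop(0); total += min(4, found)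
    | [] => st                                     -- slot==4 but no runs: `continue`
  else st

def backtrack_fill_py (remaining_obj : List Int) (sets : List Int) (runs : List Int) : Int :=
  if remaining_obj = [] then 0
  else
    let obj := PySem.List.sorted remaining_obj (fun x => x) true
    let usedSets := PySem.List.sorted sets (fun x => x) true
    let usedRuns := PySem.List.sorted runs (fun x => x) true
    (obj.foldl pvStepA (usedSets, usedRuns, 0)).2.2

-- ===== PORT B =====
def backtrack_fill_py_alt (remaining_obj : List Int) (sets : List Int) (runs : List Int) : Int :=
  if remaining_obj = [] then 0
  else
    let n3 := remaining_obj.count 3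
    let n4 := remaining_obj.count 4
    let setFill := (((PySem.List.sorted sets (fun x => x) true).take n3).map (fun s => min 3 s)).sum
    let runFill := (((PySem.List.sorted runs (fun x => x) true).take n4).map (fun r => min 4 r)).sum
    setFill + runFill

-- ===== PRECONDITION & SPEC =====
def Spec_backtrack_fill_py (remaining_obj : List Int) (sets : List Int) (runs : List Int) (out : Int) : Prop := out = backtrack_fill_py_alt remaining_obj sets runs
instance (remaining_obj : List Int) (sets : List Int) (runs : List Int) (out : Int) : Decidable (Spec_backtrack_fill_py remaining_obj sets runs out) := by unfold Spec_backtrack_fill_py; infer_instance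

-- ===== CLAIM (what is proved, stated in full; the proofs are below) =====
def Claim_equal_backtrack_fill_py : Prop := ∀ (remaining_obj : List Int) (sets : List Int) (runs : List Int), Dom_backtrack_fill_py remaining_obj sets runs → Spec_backtrack_fill_py remaining_obj sets runs (backtrack_fill_py remaining_obj sets runs)

-- ===== LEMMAS AND PROOFS =====

-- the loop's total only depends on obj through the number of 3-slots and 4-slots:
-- it consumes the first (count 3) sets and the first (count 4) runs, in order.
theorem pv_loopA (obj : List Int) : ∀ (ss rs : List Int) (tot : Int),
    (obj.foldl pvStepA (ss, rs, tot)).2.2 =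
      tot + ((ss.take (obj.count 3)).map (fun s => min 3 s)).sum
          + ((rs.take (obj.count 4)).map (fun r => min 4 r)).sum := by
  induction obj with
  | nil => intro ss rs tot; simp
  | cons slot obj ih =>
    intro ss rs tot
    by_cases h3 : slot = 3
    · subst h3
      cases ss with
      | nil => simp [pvStepA, ih]
      | cons s ss =>
        simp only [List.foldl_cons, pvStepA]
        rw [ih]
        simp [List.take_succ_cons]
        ring
    · by_cases h4 : slot = 4
      · subst h4
        cases rs with
        | nil => simp [pvStepA, ih]
        | cons r rs =>
          simp only [List.foldl_cons, pvStepA]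
          rw [ih]
          simp [List.take_succ_cons]
          ring
      · simp only [List.foldl_cons, pvStepA, if_neg h3, if_neg h4]
        rw [ih]
        simp [h3, h4]

-- ===== VERDICT (by name: the statement is the Claim_ definition above) =====
theorem backtrack_fill_py_spec : Claim_equal_backtrack_fill_py := by
  intro obj sets runs _
  unfold Spec_backtrack_fill_py backtrack_fill_py backtrack_fill_py_alt
  by_cases h : obj = []
  · simp [h]
  · simp only [if_neg h]
    rw [pv_loopA]
    have hc3 : (PySem.List.sorted obj (fun x => x) true).count 3 = obj.count 3 :=
      (PySem.List.sorted_perm obj (fun x => x) true).count_eq 3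
    have hc4 : (PySem.List.sorted obj (fun x => x) true).count 4 = obj.count 4 :=
      (PySem.List.sorted_perm obj (fun x => x) true).count_eq 4
    rw [hc3, hc4]
    ring
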